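-- pv_equiv track=rewrite | github.com/jimmy818/mexico-angular | soloperformance-api/apps/coach/utils.py | hierarchy_regions_id
-- ===== SOURCE A (Python) =====
-- def hierarchy_regions_id(hierarchy_regions):
--     primary_region=[]
--     secundary_region=[]
--     heavy_equip = []
--     light_equip  =[]
--     for name in hierarchy_regions:
--         if str(name['name']) == "Primary":
--             primary_region.append(name['region'])
--         elif str(name['name']) == "Secundary":
--             secundary_region.append(name['region'])
--         elif str(name['name']) == 'Light equip':
--             light_equip.append(name['region'])
--         elif str(name['name']) == 'Heavy equip':
--             heavy_equip.append(name['region'])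
--     return primary_region,secundary_region, heavy_equip, light_equip
-- ===== SOURCE B (Python) =====
-- def hierarchy_regions_id(hierarchy_regions):
--     primary_region = [n['region'] for n in hierarchy_regions if str(n['name']) == "Primary"]
--     secundary_region = [n['region'] for n in hierarchy_regions if str(n['name']) == "Secundary"]
--     heavy_equip = [n['region'] for n in hierarchy_regions if str(n['name']) == 'Heavy equip']
--     light_equip = [n['region'] for n in hierarchy_regions if str(n['name']) == 'Light equip']
--     return primary_region, secundary_region, heavy_equip, light_equip
-- ===== Notes on version B (the rewrite author's own statement) =====
-- stated objective: idiomatic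
-- what changed: Replaces the single bucketing loop with four independent list comprehensions, one per bucket, returned in the original order.
import Mathlib
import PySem

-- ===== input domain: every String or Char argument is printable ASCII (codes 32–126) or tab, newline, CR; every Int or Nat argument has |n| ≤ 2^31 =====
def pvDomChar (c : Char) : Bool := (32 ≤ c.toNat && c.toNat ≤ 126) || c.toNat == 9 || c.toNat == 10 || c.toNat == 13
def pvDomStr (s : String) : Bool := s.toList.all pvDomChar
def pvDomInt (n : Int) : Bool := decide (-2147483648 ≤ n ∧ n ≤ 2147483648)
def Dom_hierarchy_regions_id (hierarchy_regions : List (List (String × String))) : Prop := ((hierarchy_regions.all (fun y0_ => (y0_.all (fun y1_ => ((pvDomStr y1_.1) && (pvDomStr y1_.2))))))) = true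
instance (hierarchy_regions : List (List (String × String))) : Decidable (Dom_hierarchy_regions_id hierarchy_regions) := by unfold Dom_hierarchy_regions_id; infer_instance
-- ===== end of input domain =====

-- B replaces A's single bucketing loop by four independent list comprehensions (idiomatic decomposition; same cost class).


-- dict lookup d[k] on an insertion-ordered association list: first match; none = KeyError (excluded by Pre_)
def pvGetKey (d : List (String × String)) (k : String) : Option String :=
  (d.find? (fun p => p.1 == k)).map (·.2)

-- total variant used inside the ports; Pre_ guarantees the key is present wherever it is read
def pvGetKeyD (d : List (String × String)) (k : String) : String :=
  (pvGetKey d k).getD ""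

-- ===== PORT A =====
-- loop body of A's for-loop (one step; branches in A's order)
def pvStepA (acc : List String × List String × List String × List String)
    (name : List (String × String)) : List String × List String × List String × List String :=
  let (p, s, h, l) := acc
  if pvGetKeyD name "name" == "Primary" then (p ++ [pvGetKeyD name "region"], s, h, l)
  else if pvGetKeyD name "name" == "Secundary" then (p, s ++ [pvGetKeyD name "region"], h, l)
  else if pvGetKeyD name "name" == "Light equip" then (p, s, h, l ++ [pvGetKeyD name "region"])
  else if pvGetKeyD name "name" == "Heavy equip" then (p, s, h ++ [pvGetKeyD name "region"], l)
  else (p, s, h, l)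

def hierarchy_regions_id (hierarchy_regions : List (List (String × String))) : List String × List String × List String × List String :=
  hierarchy_regions.foldl pvStepA ([], [], [], [])

-- ===== PORT B =====
def pvBucket (hierarchy_regions : List (List (String × String))) (tag : String) : List String :=
  (hierarchy_regions.filter (fun n => pvGetKeyD n "name" == tag)).map (fun n => pvGetKeyD n "region")

def hierarchy_regions_id_alt (hierarchy_regions : List (List (String × String))) : List String × List String × List String × List String :=
  (pvBucket hierarchy_regions "Primary",
   pvBucket hierarchy_regions "Secundary",
   pvBucket hierarchy_regions "Heavy equip",
   pvBucket hierarchy_regions "Light equip")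

-- ===== PRECONDITION & SPEC =====
-- Pre_ excludes exactly the inputs on which Python A raises KeyError: a dict without a 'name' key,
-- or one whose name is one of the four tags but which lacks a 'region' key.
def Pre_hierarchy_regions_id (hierarchy_regions : List (List (String × String))) : Prop :=
  (hierarchy_regions.all (fun n =>
    (pvGetKey n "name").isSome &&
    (!(pvGetKeyD n "name" == "Primary" || pvGetKeyD n "name" == "Secundary" ||
       pvGetKeyD n "name" == "Light equip" || pvGetKeyD n "name" == "Heavy equip")
     || (pvGetKey n "region").isSome))) = true
instance (hierarchy_regions : List (List (String × String))) : Decidable (Pre_hierarchy_regions_id hierarchy_regions) := by unfold Pre_hierarchy_regions_id; infer_instance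

def pvWitness_hierarchy_regions_id : (List (List (String × String))) :=
  [[("name", "Primary"), ("region", "north")], [("name", "other")]]

def Spec_hierarchy_regions_id (hierarchy_regions : List (List (String × String))) (out : List String × List String × List String × List String) : Prop := out = hierarchy_regions_id_alt hierarchy_regions
instance (hierarchy_regions : List (List (String × String))) (out : List String × List String × List String × List String) : Decidable (Spec_hierarchy_regions_id hierarchy_regions out) := by unfold Spec_hierarchy_regions_id; infer_instance

-- ===== CLAIM (what is proved, stated in full; the proofs are below) =====
def Claim_equal_hierarchy_regions_id : Prop := ∀ (hierarchy_regions : List (List (String × String))), Dom_hierarchy_regions_id hierarchy_regions → Pre_hierarchy_regions_id hierarchy_regions → Spec_hierarchy_regions_id hierarchy_regions (hierarchy_regions_id hierarchy_regions)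

-- ===== LEMMAS AND PROOFS =====

-- loop invariant: A's fold with accumulator (p,s,h,l) appends B's four buckets
theorem foldA_eq (hr : List (List (String × String))) :
    ∀ p s h l, hr.foldl pvStepA (p, s, h, l)
    = (p ++ pvBucket hr "Primary", s ++ pvBucket hr "Secundary",
       h ++ pvBucket hr "Heavy equip", l ++ pvBucket hr "Light equip") := by
  induction hr with
  | nil => simp [pvBucket]
  | cons x xs ih =>
      intro p s h l
      rw [List.foldl_cons]
      by_cases h1 : pvGetKeyD x "name" == "Primary"
      · rw [show pvStepA (p, s, h, l) x = (p ++ [pvGetKeyD x "region"], s, h, l) by simp [pvStepA, h1], ih]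
        have e := eq_of_beq h1; simp [pvBucket, e]
      · by_cases h2 : pvGetKeyD x "name" == "Secundary"
        · rw [show pvStepA (p, s, h, l) x = (p, s ++ [pvGetKeyD x "region"], h, l) by simp [pvStepA, h1, h2], ih]
          have e := eq_of_beq h2; simp [pvBucket, e]
        · by_cases h3 : pvGetKeyD x "name" == "Light equip"
          · rw [show pvStepA (p, s, h, l) x = (p, s, h, l ++ [pvGetKeyD x "region"]) by simp [pvStepA, h1, h2, h3], ih]
            have e := eq_of_beq h3; simp [pvBucket, e]
          · by_cases h4 : pvGetKeyD x "name" == "Heavy equip"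
            · rw [show pvStepA (p, s, h, l) x = (p, s, h ++ [pvGetKeyD x "region"], l) by simp [pvStepA, h1, h2, h3, h4], ih]
              have e := eq_of_beq h4; simp [pvBucket, e]
            · rw [show pvStepA (p, s, h, l) x = (p, s, h, l) by simp [pvStepA, h1, h2, h3, h4], ih]
              simp [pvBucket, h1, h2, h3, h4]

-- ===== VERDICT (by name: the statement is the Claim_ definition above) =====
theorem hierarchy_regions_id_spec : Claim_equal_hierarchy_regions_id := by
  intro hr _ _
  unfold Spec_hierarchy_regions_id hierarchy_regions_id hierarchy_regions_id_alt
  rw [foldA_eq hr [] [] [] []]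
  simp
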